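-- pv_equiv track=rewrite | github.com/DomenSoberlFamnit/BrAId | statistics/siwim_ca.py | prop_has_errors
-- ===== SOURCE A (Python) =====
-- error_flags = ['yolo_error', 'photo_truncated', 'vehicle_joined', 'vehicle_split', 'cannot_label', 'inconsistent_data', 'off_lane', 'wrong_lane', 'multiple_vehicles']
--
-- def prop_has_errors(prop):
--     if 'errors' not in prop:
--         return False
--
--     errors = prop['errors']
--
--     for flag in error_flags:
--         if flag in errors and errors[flag] != 0:
--             return True
--
--     return False
-- ===== SOURCE B (Python) =====
-- error_flags = ['yolo_error', 'photo_truncated', 'vehicle_joined', 'vehicle_split', 'cannot_label', 'inconsistent_data', 'off_lane', 'wrong_lane', 'multiple_vehicles']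
--
-- _flag_set = set(error_flags)
--
-- def prop_has_errors(prop):
--     errors = prop.get('errors')
--     if errors is None:
--         return False
--     return any(k in _flag_set and v != 0 for k, v in errors.items())
-- ===== Notes on version B (the rewrite author's own statement) =====
-- stated objective: idiomatic
-- what changed: B inverts the traversal: instead of probing the errors dict once per flag in the fixed flag list, it iterates the entries actually present in errors and tests membership in a prebuilt flag set with any(); Pre_ excludes association lists whose 'errors' value has duplicate keys, a shape a real Python dict cannot have, on which the encoding's first-match lookup order is accidental.
import Mathlib
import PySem

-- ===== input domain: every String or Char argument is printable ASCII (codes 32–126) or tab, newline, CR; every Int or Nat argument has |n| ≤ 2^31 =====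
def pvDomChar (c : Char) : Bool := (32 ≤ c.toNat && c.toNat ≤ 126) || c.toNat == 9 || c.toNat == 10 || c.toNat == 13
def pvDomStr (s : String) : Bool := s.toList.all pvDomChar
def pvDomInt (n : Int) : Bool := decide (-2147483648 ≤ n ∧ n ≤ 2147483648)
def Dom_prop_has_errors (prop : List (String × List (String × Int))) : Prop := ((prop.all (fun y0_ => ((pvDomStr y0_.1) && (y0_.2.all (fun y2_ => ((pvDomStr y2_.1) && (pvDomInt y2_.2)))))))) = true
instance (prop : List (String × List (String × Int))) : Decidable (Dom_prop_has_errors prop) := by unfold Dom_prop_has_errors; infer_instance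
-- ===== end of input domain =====

-- B inverts the traversal: it iterates the entries of the errors dict and tests membership in a
-- prebuilt flag set, instead of probing the dict once per flag of the fixed flag list.

-- ===== PORT A =====
def errorFlags : List String :=
  ["yolo_error", "photo_truncated", "vehicle_joined", "vehicle_split", "cannot_label",
   "inconsistent_data", "off_lane", "wrong_lane", "multiple_vehicles"]

-- the 'for flag in error_flags' loop with early return; 'flag in errors and errors[flag] != 0'
def aFlagLoop (errors : List (String × Int)) : List String → Bool
  | [] => false
  | flag :: rest =>
    match PySem.Dict.get? (PySem.Dict.mk errors) flag with
    | some v => if v != 0 then true else aFlagLoop errors rest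
    | none => aFlagLoop errors rest

def prop_has_errors (prop : List (String × List (String × Int))) : Bool :=
  match PySem.Dict.get? (PySem.Dict.mk prop) "errors" with
  | none => false
  | some errors => aFlagLoop errors errorFlags

-- ===== PORT B =====
def errFlagSetAlt : PySem.Set String :=
  PySem.Set.ofList ["yolo_error", "photo_truncated", "vehicle_joined", "vehicle_split", "cannot_label",
   "inconsistent_data", "off_lane", "wrong_lane", "multiple_vehicles"]

def prop_has_errors_alt (prop : List (String × List (String × Int))) : Bool :=
  match PySem.Dict.get? (PySem.Dict.mk prop) "errors" with
  | none => false
  | some errors => errors.any (fun kv => PySem.Set.contains errFlagSetAlt kv.1 && kv.2 != 0)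

-- ===== PRECONDITION & SPEC =====
-- Pre_ excludes association lists whose 'errors' value carries duplicate keys: a real Python dict
-- cannot have them, and on that encoding corner A's first-match probe order is accidental.
def Pre_prop_has_errors (prop : List (String × List (String × Int))) : Prop :=
  ∀ errors ∈ PySem.Dict.get? (PySem.Dict.mk prop) "errors", (errors.map Prod.fst).Nodup
instance (prop : List (String × List (String × Int))) : Decidable (Pre_prop_has_errors prop) := by
  unfold Pre_prop_has_errors; infer_instance

def pvWitness_prop_has_errors : (List (String × List (String × Int))) :=
  [("errors", [("yolo_error", 1), ("off_lane", 0)])]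

def Spec_prop_has_errors (prop : List (String × List (String × Int))) (out : Bool) : Prop := out = prop_has_errors_alt prop
instance (prop : List (String × List (String × Int))) (out : Bool) : Decidable (Spec_prop_has_errors prop out) := by unfold Spec_prop_has_errors; infer_instance

-- ===== CLAIM (what is proved, stated in full; the proofs are below) =====
def Claim_equal_prop_has_errors : Prop := ∀ (prop : List (String × List (String × Int))), Dom_prop_has_errors prop → Pre_prop_has_errors prop → Spec_prop_has_errors prop (prop_has_errors prop)

-- ===== LEMMAS AND PROOFS =====

lemma aFlagLoop_eq_true_iff (errors : List (String × Int)) (flags : List String) :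
    aFlagLoop errors flags = true ↔
      ∃ f ∈ flags, ∃ v, PySem.Dict.get? (PySem.Dict.mk errors) f = some v ∧ v ≠ 0 := by
  induction flags with
  | nil => simp [aFlagLoop]
  | cons flag rest ih =>
    cases h : PySem.Dict.get? (PySem.Dict.mk errors) flag with
    | none => simp [aFlagLoop, h, ih]
    | some v =>
      by_cases hv0 : v = 0
      · subst hv0; simp [aFlagLoop, h, ih]
      · simp only [aFlagLoop, h, bne_iff_ne, ne_eq, hv0, not_false_eq_true, if_true, true_iff,
          List.exists_mem_cons_iff]
        exact .inl ⟨v, rfl, hv0⟩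

lemma bLoop_eq_true_iff (errors : List (String × Int)) :
    (errors.any (fun kv => PySem.Set.contains errFlagSetAlt kv.1 && kv.2 != 0)) = true ↔
      ∃ kv ∈ errors, kv.1 ∈ errorFlags ∧ kv.2 ≠ 0 := by
  have hset : errFlagSetAlt = PySem.Set.ofList errorFlags := by decide
  rw [hset]
  simp [List.any_eq_true, PySem.Set.contains, PySem.Set.mem_ofList]

lemma loops_agree (errors : List (String × Int)) (hnd : (errors.map Prod.fst).Nodup) :
    aFlagLoop errors errorFlags =
      errors.any (fun kv => PySem.Set.contains errFlagSetAlt kv.1 && kv.2 != 0) := by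
  have hkeys : (PySem.Dict.mk errors).keys.Nodup := by
    simpa [PySem.Dict.keys] using hnd
  rw [Bool.eq_iff_iff, aFlagLoop_eq_true_iff, bLoop_eq_true_iff]
  constructor
  · rintro ⟨f, hf, v, hv, hv0⟩
    have hmem : (f, v) ∈ (PySem.Dict.mk errors).items := PySem.Dict.mem_items_of_get?_eq_some _ hv
    exact ⟨(f, v), hmem, hf, hv0⟩
  · rintro ⟨⟨k, v⟩, hkv, hk, hv0⟩
    exact ⟨k, hk, v, PySem.Dict.get?_of_mem_items _ hkv hkeys, hv0⟩

-- ===== VERDICT (by name: the statement is the Claim_ definition above) =====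
theorem prop_has_errors_spec : Claim_equal_prop_has_errors := by
  intro prop _ hpre
  unfold Spec_prop_has_errors prop_has_errors prop_has_errors_alt
  cases h : PySem.Dict.get? (PySem.Dict.mk prop) "errors" with
  | none => rfl
  | some errors => exact loops_agree errors (hpre errors h)
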